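-- pv_equiv track=rewrite | github.com/mrpavithran/local_file_convertor_ai | scripts/register_tools.py | extract_tool_description
-- ===== SOURCE A (Python) =====
-- def extract_tool_description(content: str) -> str:
--     """Extract tool description from docstring."""
--     lines = content.split('\n')
--     description = []
--
--     in_docstring = False
--     for line in lines:
--         stripped = line.strip()
--
--         if stripped.startswith('"""') or stripped.startswith("'''"):
--             if in_docstring:
--                 break
--             in_docstring = True
--             continue
--
--         if in_docstring:
--             if stripped.endswith('"""') or stripped.endswith("'''"):
--                 break
--             if stripped:
--                 description.append(stripped)
--
--     return ' '.join(description) if description else "No description available"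
-- ===== SOURCE B (Python) =====
-- def extract_tool_description(content: str) -> str:
--     """Extract docstring description via a declarative index pipeline:
--     strip all lines once, find opener/closer indices, slice, filter, join."""
--     stripped = [line.strip() for line in content.split('\n')]
--     opens = lambda s: s.startswith('"""') or s.startswith("'''")
--     closes = lambda s: opens(s) or s.endswith('"""') or s.endswith("'''")
--     start = next((i for i, s in enumerate(stripped) if opens(s)), None)
--     if start is None:
--         return "No description available"
--     rest = stripped[start + 1:]
--     stop = next((i for i, s in enumerate(rest) if closes(s)), len(rest))
--     desc = [s for s in rest[:stop] if s]
--     return ' '.join(desc) if desc else "No description available"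
-- ===== Notes on version B (the rewrite author's own statement) =====
-- stated objective: alternative
-- what changed: Replaces A's single stateful loop with an in_docstring flag and breaks by a loop-free pipeline: strip all lines once, compute the opener index and the closer index with enumerate/next, then slice, filter empties with a comprehension and join.
import Mathlib
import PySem

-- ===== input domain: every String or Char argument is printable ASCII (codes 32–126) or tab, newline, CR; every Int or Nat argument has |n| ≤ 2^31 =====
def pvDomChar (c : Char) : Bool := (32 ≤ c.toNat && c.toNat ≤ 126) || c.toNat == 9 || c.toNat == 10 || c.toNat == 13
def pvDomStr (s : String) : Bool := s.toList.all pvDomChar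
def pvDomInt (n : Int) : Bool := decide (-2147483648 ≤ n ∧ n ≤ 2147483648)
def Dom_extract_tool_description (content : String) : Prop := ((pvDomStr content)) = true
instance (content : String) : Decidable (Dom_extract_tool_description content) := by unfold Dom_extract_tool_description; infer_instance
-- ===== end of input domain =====

-- B replaces A's stateful flag-loop by a loop-free pipeline (strip all lines,
-- find opener/closer indices, slice, filter, join); objective: alternative.

-- ===== PORT A =====
-- A's for-loop with its in_docstring flag and breaks, as structural recursion.
def pvALoop : List String → Bool → List String → List String
  | [], _, desc => desc
  | line :: rest, ind, desc =>
    let s := PySem.Str.strip line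
    if PySem.Str.startswith s "\"\"\"" || PySem.Str.startswith s "'''" then
      if ind then desc else pvALoop rest true desc
    else if ind then
      if PySem.Str.endswith s "\"\"\"" || PySem.Str.endswith s "'''" then desc
      else if s ≠ "" then pvALoop rest ind (desc ++ [s]) else pvALoop rest ind desc
    else pvALoop rest ind desc

def extract_tool_description (content : String) : String :=
  let desc := pvALoop (((PySem.Str.split? content "\n").getD [])) false []
  if desc ≠ [] then PySem.Str.join " " desc else "No description available"

-- ===== PORT B =====
def pvOpens (s : String) : Bool :=
  PySem.Str.startswith s "\"\"\"" || PySem.Str.startswith s "'''"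
def pvCloses (s : String) : Bool :=
  pvOpens s || PySem.Str.endswith s "\"\"\"" || PySem.Str.endswith s "'''"

def extract_tool_description_alt (content : String) : String :=
  let stripped := (((PySem.Str.split? content "\n").getD [])).map PySem.Str.strip
  match stripped.findIdx? pvOpens with
  | none => "No description available"
  | some start =>
    let rest := stripped.drop (start + 1)
    let stop := (rest.findIdx? pvCloses).getD rest.length
    let desc := (rest.take stop).filter (· ≠ "")
    if desc ≠ [] then PySem.Str.join " " desc else "No description available"

-- ===== PRECONDITION & SPEC =====
def Spec_extract_tool_description (content : String) (out : String) : Prop := out = extract_tool_description_alt content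
instance (content : String) (out : String) : Decidable (Spec_extract_tool_description content out) := by unfold Spec_extract_tool_description; infer_instance

-- ===== CLAIM (what is proved, stated in full; the proofs are below) =====
def Claim_equal_extract_tool_description : Prop := ∀ (content : String), Dom_extract_tool_description content → Spec_extract_tool_description content (extract_tool_description content)

-- ===== LEMMAS AND PROOFS =====
-- A's loop restated over the already-stripped lines (proof helper only).
def pvEnds (s : String) : Bool :=
  PySem.Str.endswith s "\"\"\"" || PySem.Str.endswith s "'''"

def pvALoopS : List String → Bool → List String → List String
  | [], _, desc => desc
  | s :: rest, ind, desc =>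
    if pvOpens s then
      if ind then desc else pvALoopS rest true desc
    else if ind then
      if pvEnds s then desc
      else if s ≠ "" then pvALoopS rest ind (desc ++ [s]) else pvALoopS rest ind desc
    else pvALoopS rest ind desc

theorem pvALoop_eq_S (lines : List String) (b : Bool) (desc : List String) :
    pvALoop lines b desc = pvALoopS (lines.map PySem.Str.strip) b desc := by
  induction lines generalizing b desc with
  | nil => rfl
  | cons line rest ih =>
    simp only [pvALoop, pvALoopS, List.map, pvOpens, pvEnds]
    split_ifs <;> simp_all

theorem pvCloses_eq (s : String) : pvCloses s = (pvOpens s || pvEnds s) := by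
  simp [pvCloses, pvEnds, Bool.or_assoc]

theorem pvGetD_map_succ (o : Option Nat) (n : Nat) :
    ((o.map (· + 1)).getD (n + 1)) = o.getD n + 1 := by
  cases o <;> rfl

-- Phase 1: the flag-false loop is a search for the opener index.
theorem pvALoopS_false (ss : List String) (desc : List String) :
    pvALoopS ss false desc =
      match ss.findIdx? pvOpens with
      | none => desc
      | some i => pvALoopS (ss.drop (i + 1)) true desc := by
  induction ss with
  | nil => rfl
  | cons s rest ih =>
    simp only [pvALoopS, List.findIdx?_cons]
    by_cases h : pvOpens s = true
    · simp [h]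
    · simp only [h, if_neg, Bool.false_eq_true, not_false_iff]
      rw [ih]
      cases hf : rest.findIdx? pvOpens <;> simp

-- Phase 2: the flag-true loop takes up to the closer and keeps non-empty lines.
theorem pvALoopS_true (ss : List String) (desc : List String) :
    pvALoopS ss true desc =
      desc ++ (ss.take ((ss.findIdx? pvCloses).getD ss.length)).filter (· ≠ "") := by
  induction ss generalizing desc with
  | nil => simp [pvALoopS]
  | cons s rest ih =>
    simp only [pvALoopS, List.findIdx?_cons, pvCloses_eq, List.length_cons]
    cases ho : pvOpens s <;> cases he : pvEnds s <;>
      by_cases hs : s = "" <;>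
        simp [ho, he, hs, ih, pvGetD_map_succ, List.take_succ_cons, List.filter_cons]

-- ===== VERDICT (by name: the statement is the Claim_ definition above) =====
theorem extract_tool_description_spec : Claim_equal_extract_tool_description := by
  intro content _
  unfold Spec_extract_tool_description extract_tool_description extract_tool_description_alt
  rw [pvALoop_eq_S, pvALoopS_false]
  cases hf : ((((PySem.Str.split? content "\n").getD [])).map PySem.Str.strip).findIdx? pvOpens with
  | none => simp only [hf]; rfl
  | some i =>
    simp only [hf]
    rw [pvALoopS_true, List.nil_append]
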